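-- pv_equiv track=rewrite | github.com/margotrud/shopping_assistant | src/color_sentiment_extractor/extraction/general/sentiment/router.py | _stable_sorted_phrases
-- ===== SOURCE A (Python) =====
-- from collections.abc import Iterable, Mapping
--
-- def _stable_sorted_phrases(items: Iterable[str]) -> list[str]:
--     """
--     Case-insensitive, whitespace-trimmed, duplicate-free ordering.
--     Dedup is done with casefold(); original casing of first occurrence is preserved.
--     """
--     canon: dict[str, str] = {}
--     for s in items:
--         if not s:
--             continue
--         t = s.strip()
--         if not t:
--             continue
--         key = t.casefold()
--         # preserve first-seen original casing
--         canon.setdefault(key, t)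
--     # sort by case-insensitive key to keep deterministic order
--     return [canon[k] for k in sorted(canon.keys())]
-- ===== SOURCE B (Python) =====
-- def _stable_sorted_phrases(items):
--     """Filter+trim once, one stable sort keyed on casefold, then a single
--     adjacent-dedup pass keeping the first (first-seen) element of each key run."""
--     cleaned = []
--     for s in items:
--         if not s:
--             continue
--         t = s.strip()
--         if not t:
--             continue
--         cleaned.append(t)
--     cleaned.sort(key=str.casefold)
--     out = []
--     prev = None
--     for t in cleaned:
--         k = t.casefold()
--         if k != prev:
--             out.append(t)
--             prev = k
--     return out
-- ===== Notes on version B (the rewrite author's own statement) =====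
-- stated objective: alternative
-- what changed: Replaces A's first-wins dict keyed by casefold plus a sort of the dict keys with a dict-free pipeline: filter-and-trim into a list, one stable sort of all phrases keyed on casefold, then a single adjacent-run dedup keeping the first element of each equal-key run (stability makes that the first-seen casing).
import Mathlib
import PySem

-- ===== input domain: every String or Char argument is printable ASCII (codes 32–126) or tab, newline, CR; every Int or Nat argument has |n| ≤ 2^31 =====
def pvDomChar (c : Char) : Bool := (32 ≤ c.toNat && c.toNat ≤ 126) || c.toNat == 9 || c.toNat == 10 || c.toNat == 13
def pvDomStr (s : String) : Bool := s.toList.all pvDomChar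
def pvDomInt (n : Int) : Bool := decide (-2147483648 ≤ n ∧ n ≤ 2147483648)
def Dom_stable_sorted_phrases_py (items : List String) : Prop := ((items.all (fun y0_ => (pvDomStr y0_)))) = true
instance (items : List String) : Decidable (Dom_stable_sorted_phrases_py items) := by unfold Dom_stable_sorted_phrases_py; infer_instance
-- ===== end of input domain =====

-- B replaces A's first-wins dict + key sort by filter-trim, one stable sort keyed on casefold,
-- and an adjacent-run dedup pass; same return value (alternative decomposition, no speed claim).


-- ===== PORT A =====
-- 't.casefold()' is ported as PySem.Str.lower: exact on the ASCII input domain, where casefold = lower.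
-- 'canon[k]' is ported as '(canon.get? k).getD ""': k ranges over canon.keys, so get? is always some
-- and the default is never used (Python's KeyError is unreachable here).
def stable_sorted_phrases_py (items : List String) : List String :=
  let canon : PySem.Dict String String :=
    items.foldl (fun canon s =>
      if s = "" then canon
      else
        let t := PySem.Str.strip s
        if t = "" then canon
        else
          let key := PySem.Str.lower t
          canon.setdefault key t) PySem.Dict.empty
  (PySem.List.sorted canon.keys (fun k => k) false).map (fun k => (canon.get? k).getD "")

-- ===== PORT B =====
def stable_sorted_phrases_py_alt (items : List String) : List String :=
  let cleaned := items.foldl (fun acc s =>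
    if s = "" then acc
    else
      let t := PySem.Str.strip s
      if t = "" then acc else acc ++ [t]) []
  let srt := PySem.List.sorted cleaned (fun t => PySem.Str.lower t) false
  (srt.foldl (fun (st : List String × Option String) t =>
      let k := PySem.Str.lower t
      if st.2 = some k then st else (st.1 ++ [t], some k)) ([], none)).1

-- ===== PRECONDITION & SPEC =====
def Spec_stable_sorted_phrases_py (items : List String) (out : List String) : Prop := out = stable_sorted_phrases_py_alt items
instance (items : List String) (out : List String) : Decidable (Spec_stable_sorted_phrases_py items out) := by unfold Spec_stable_sorted_phrases_py; infer_instance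

-- ===== CLAIM (what is proved, stated in full; the proofs are below) =====
def Claim_equal_stable_sorted_phrases_py : Prop := ∀ (items : List String), Dom_stable_sorted_phrases_py items → Spec_stable_sorted_phrases_py items (stable_sorted_phrases_py items)

-- ===== LEMMAS AND PROOFS =====

def pvClean (s : String) : Option String :=
  if s = "" then none
  else if PySem.Str.strip s = "" then none
  else some (PySem.Str.strip s)

def pvFirstW (k : String) (L : List String) : Option String :=
  (L.filter (fun t => PySem.Str.lower t = k)).head?

def pvDedup : Option String → List String → List String
  | _, [] => []
  | prev, t :: ts =>
      if prev = some (PySem.Str.lower t) then pvDedup prev ts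
      else t :: pvDedup (some (PySem.Str.lower t)) ts

lemma pv_foldA_eq (items : List String) (d : PySem.Dict String String) :
    items.foldl (fun canon s =>
      if s = "" then canon
      else if PySem.Str.strip s = "" then canon
      else canon.setdefault (PySem.Str.lower (PySem.Str.strip s)) (PySem.Str.strip s)) d
    = (items.filterMap pvClean).foldl (fun canon t => canon.setdefault (PySem.Str.lower t) t) d := by
  induction items generalizing d with
  | nil => rfl
  | cons s rest ih =>
    by_cases h1 : s = "" <;> by_cases h2 : PySem.Str.strip s = "" <;>
      simp [pvClean, h1, h2, ih]

lemma pv_cleanFold_eq (items : List String) (acc : List String) :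
    items.foldl (fun acc s =>
      if s = "" then acc
      else if PySem.Str.strip s = "" then acc
      else acc ++ [PySem.Str.strip s]) acc
    = acc ++ items.filterMap pvClean := by
  induction items generalizing acc with
  | nil => simp
  | cons s rest ih =>
    by_cases h1 : s = "" <;> by_cases h2 : PySem.Str.strip s = "" <;>
      simp [pvClean, h1, h2, ih]

lemma pv_foldB_eq (S : List String) (acc : List String) (prev : Option String) :
    (S.foldl (fun (st : List String × Option String) t =>
      if st.2 = some (PySem.Str.lower t) then st
      else (st.1 ++ [t], some (PySem.Str.lower t))) (acc, prev)).1
    = acc ++ pvDedup prev S := by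
  induction S generalizing acc prev with
  | nil => simp [pvDedup]
  | cons t ts ih =>
    by_cases h : prev = some (PySem.Str.lower t) <;>
      simp [pvDedup, h, ih]

lemma pv_get_foldC (L : List String) (d : PySem.Dict String String) (k : String) :
    (L.foldl (fun canon t => canon.setdefault (PySem.Str.lower t) t) d).get? k
    = ((d.get? k).or (pvFirstW k L)) := by
  induction L generalizing d with
  | nil => simp [pvFirstW]
  | cons t L ih =>
    rw [List.foldl_cons, ih]
    by_cases hk : k = PySem.Str.lower t
    · subst hk
      rw [PySem.Dict.get?_setdefault_self]
      cases d.get? (PySem.Str.lower t) <;> simp [pvFirstW]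
    · rw [PySem.Dict.get?_setdefault_of_ne _ _ hk]
      have : pvFirstW k (t :: L) = pvFirstW k L := by
        simp only [pvFirstW, List.filter_cons]
        rw [if_neg (by simpa using fun h : PySem.Str.lower t = k => hk h.symm)]
      rw [this]

lemma pv_keys_foldC_nodup (L : List String) (d : PySem.Dict String String) (h : d.keys.Nodup) :
    (L.foldl (fun canon t => canon.setdefault (PySem.Str.lower t) t) d).keys.Nodup := by
  induction L generalizing d with
  | nil => exact h
  | cons t L ih =>
    rw [List.foldl_cons]
    apply ih
    by_cases hc : d.contains (PySem.Str.lower t)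
    · rw [PySem.Dict.setdefault_of_contains _ _ hc]; exact h
    · rw [PySem.Dict.setdefault_of_not_contains _ _ (by simpa using hc)]
      exact PySem.Dict.nodup_keys_insert _ _ _ h

lemma pv_mem_keys_setdefault (d : PySem.Dict String String) (k k' v : String) :
    k ∈ (d.setdefault k' v).keys ↔ k = k' ∨ k ∈ d.keys := by
  rw [← PySem.Dict.contains_iff_mem_keys, PySem.Dict.contains_setdefault,
    Bool.or_eq_true, beq_iff_eq, PySem.Dict.contains_iff_mem_keys]

lemma pv_mem_keys_foldC (L : List String) (d : PySem.Dict String String) (k : String) :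
    k ∈ (L.foldl (fun canon t => canon.setdefault (PySem.Str.lower t) t) d).keys
    ↔ k ∈ d.keys ∨ k ∈ L.map (fun t => PySem.Str.lower t) := by
  induction L generalizing d with
  | nil => simp
  | cons t L ih =>
    rw [List.foldl_cons, ih, pv_mem_keys_setdefault]
    simp only [List.map_cons, List.mem_cons]
    tauto

lemma pv_firstW_lower {k t : String} {L : List String} (h : pvFirstW k L = some t) :
    PySem.Str.lower t = k := by
  obtain ⟨ys, hys⟩ := List.head?_eq_some_iff.mp h
  have : t ∈ L.filter (fun t => PySem.Str.lower t = k) := by rw [hys]; simp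
  exact of_decide_eq_true (List.mem_filter.mp this).2

lemma pv_firstW_ne_none_iff (k : String) (L : List String) :
    (∃ t, pvFirstW k L = some t) ↔ k ∈ L.map (fun t => PySem.Str.lower t) := by
  rw [pvFirstW]
  cases hf : L.filter (fun t => PySem.Str.lower t = k) with
  | nil =>
    simp only [List.head?_nil]
    constructor
    · rintro ⟨t, ht⟩; simp at ht
    · intro hm
      obtain ⟨t, htL, htk⟩ := List.mem_map.mp hm
      have : t ∈ L.filter (fun t => PySem.Str.lower t = k) :=
        List.mem_filter.mpr ⟨htL, by simpa using htk⟩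
      rw [hf] at this; simp at this
  | cons u us =>
    simp only [List.head?_cons]
    constructor
    · rintro ⟨t, ht⟩
      have hu : u ∈ L.filter (fun t => PySem.Str.lower t = k) := by rw [hf]; simp
      have := List.mem_filter.mp hu
      exact List.mem_map.mpr ⟨u, this.1, by simpa using this.2⟩
    · intro _; exact ⟨u, rfl⟩

lemma pv_mem_pvDedup {t : String} {prev : Option String} {S : List String}
    (h : t ∈ pvDedup prev S) : t ∈ S := by
  induction S generalizing prev with
  | nil => simp [pvDedup] at h
  | cons u us ih =>
    rw [pvDedup] at h
    split at h
    · exact List.mem_cons_of_mem _ (ih h)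
    · rcases List.mem_cons.mp h with h | h
      · exact h ▸ List.mem_cons_self
      · exact List.mem_cons_of_mem _ (ih h)


-- insertBy stability step
lemma pv_insertBy_filter (k : String) (x : String) (acc : List String)
    (hacc : acc.Pairwise (fun a b => PySem.Str.lower a ≤ PySem.Str.lower b)) :
    (PySem.List.insertBy (fun a b => decide (PySem.Str.lower a < PySem.Str.lower b)) x acc).filter
        (fun t => PySem.Str.lower t = k)
    = if PySem.Str.lower x = k then acc.filter (fun t => PySem.Str.lower t = k) ++ [x]
      else acc.filter (fun t => PySem.Str.lower t = k) := by
  induction acc with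
  | nil =>
    simp only [PySem.List.insertBy, List.filter]
    split_ifs with h <;> simp [h]
  | cons y ys ih =>
    rw [List.pairwise_cons] at hacc
    rw [PySem.List.insertBy]
    by_cases hlt : PySem.Str.lower x < PySem.Str.lower y
    · rw [if_pos (by simpa using hlt)]
      by_cases hxk : PySem.Str.lower x = k
      · have hempty : (y :: ys).filter (fun t => PySem.Str.lower t = k) = [] := by
          rw [List.filter_eq_nil_iff]
          intro u hu
          have : PySem.Str.lower y ≤ PySem.Str.lower u := by
            rcases List.mem_cons.mp hu with h | h
            · exact h ▸ le_refl _
            · exact hacc.1 u h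
          have : PySem.Str.lower x < PySem.Str.lower u := lt_of_lt_of_le hlt this
          simp only [decide_eq_true_eq]
          intro hk; rw [hk, ← hxk] at this; exact lt_irrefl _ this
        rw [if_pos hxk, hempty]
        simp [hxk, hempty]
      · rw [if_neg hxk]
        simp [hxk]
    · rw [if_neg (by simpa using hlt)]
      rw [List.filter_cons, List.filter_cons, ih hacc.2]
      by_cases hyk : PySem.Str.lower y = k <;> by_cases hxk : PySem.Str.lower x = k <;>
        simp [hyk, hxk]

-- stability of the full sort, per key class
lemma pv_filter_sorted (L : List String) (k : String) :
    (PySem.List.sorted L PySem.Str.lower false).filter (fun t => PySem.Str.lower t = k)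
    = L.filter (fun t => PySem.Str.lower t = k) := by
  induction L using List.reverseRecOn with
  | nil => rfl
  | append_singleton L x ih =>
    have hs : PySem.List.sorted (L ++ [x]) PySem.Str.lower false
        = PySem.List.insertBy (fun a b => decide (PySem.Str.lower a < PySem.Str.lower b)) x
            (PySem.List.sorted L PySem.Str.lower false) := by
      simp [PySem.List.sorted, List.foldl_append]
    rw [hs, pv_insertBy_filter k x _ (PySem.List.sorted_pairwise L PySem.Str.lower), ih,
      List.filter_append]
    split_ifs with h <;> simp [h]



lemma pv_dedup_some (k : String) (ts : List String) :
    pvDedup (some k) ts = pvDedup none (ts.dropWhile (fun u => PySem.Str.lower u = k)) := by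
  induction ts with
  | nil => rfl
  | cons u us ih =>
    rw [pvDedup, List.dropWhile_cons]
    by_cases h : PySem.Str.lower u = k
    · rw [if_pos (by simp [h]), if_pos (by simp [h]), ih]
    · rw [if_neg (by simpa using fun he : k = PySem.Str.lower u => h he.symm),
        if_neg (by simpa using h)]
      rfl

-- every element surviving the leading run has key strictly above the head's
lemma pv_drop_gt (t : String) (ts : List String)
    (hs : (t :: ts).Pairwise (fun a b => PySem.Str.lower a ≤ PySem.Str.lower b)) :
    ∀ w ∈ ts.dropWhile (fun u => PySem.Str.lower u = PySem.Str.lower t),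
      PySem.Str.lower t < PySem.Str.lower w := by
  rw [List.pairwise_cons] at hs
  intro w hw
  cases hd : ts.dropWhile (fun u => PySem.Str.lower u = PySem.Str.lower t) with
  | nil => rw [hd] at hw; simp at hw
  | cons u us =>
    have hne : ¬ (PySem.Str.lower u = PySem.Str.lower t) := by
      have := List.head?_dropWhile_not (fun u => decide (PySem.Str.lower u = PySem.Str.lower t)) ts
      rw [hd] at this; simpa using this
    have hsuf : (u :: us) <:+ ts := hd ▸ List.dropWhile_suffix _
    have hu_mem : u ∈ ts := hsuf.subset List.mem_cons_self
    have htu : PySem.Str.lower t < PySem.Str.lower u :=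
      lt_of_le_of_ne (hs.1 u hu_mem) (fun he => hne he.symm)
    rw [hd] at hw
    rcases List.mem_cons.mp hw with rfl | hw'
    · exact htu
    · have hp : (u :: us).Pairwise (fun a b => PySem.Str.lower a ≤ PySem.Str.lower b) :=
        hs.2.sublist hsuf.sublist
      exact lt_of_lt_of_le htu ((List.pairwise_cons.mp hp).1 w hw')

lemma pv_dedup_pairwise : ∀ (n : Nat) (S : List String), S.length ≤ n →
    S.Pairwise (fun a b => PySem.Str.lower a ≤ PySem.Str.lower b) →
    (pvDedup none S).Pairwise (fun a b => PySem.Str.lower a < PySem.Str.lower b) := by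
  intro n
  induction n with
  | zero => intro S hl _; rw [List.length_eq_zero_iff.mp (Nat.le_zero.mp hl)]; exact List.Pairwise.nil
  | succ n ih =>
    intro S hl hs
    cases S with
    | nil => exact List.Pairwise.nil
    | cons t ts =>
      rw [pvDedup, if_neg (by simp), pv_dedup_some]
      set ds := ts.dropWhile (fun u => PySem.Str.lower u = PySem.Str.lower t) with hds
      have hlds : ds.length ≤ n := by
        rw [hds]
        exact le_trans (List.length_dropWhile_le _ ts)
          (by simp only [List.length_cons] at hl; omega)
      have hpds : ds.Pairwise (fun a b => PySem.Str.lower a ≤ PySem.Str.lower b) :=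
        (List.pairwise_cons.mp hs).2.sublist (List.dropWhile_sublist _)
      refine List.pairwise_cons.mpr ⟨?_, ih ds hlds hpds⟩
      intro w hw
      exact pv_drop_gt t ts hs w (pv_mem_pvDedup hw)

lemma pv_mem_dedup_iff : ∀ (n : Nat) (S : List String), S.length ≤ n →
    S.Pairwise (fun a b => PySem.Str.lower a ≤ PySem.Str.lower b) →
    ∀ (x : String), x ∈ pvDedup none S ↔ pvFirstW (PySem.Str.lower x) S = some x := by
  intro n
  induction n with
  | zero =>
    intro S hl _ x
    rw [List.length_eq_zero_iff.mp (Nat.le_zero.mp hl)]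
    simp [pvDedup, pvFirstW]
  | succ n ih =>
    intro S hl hs x
    cases S with
    | nil => simp [pvDedup, pvFirstW]
    | cons t ts =>
      rw [pvDedup, if_neg (by simp), pv_dedup_some]
      set ds := ts.dropWhile (fun u => PySem.Str.lower u = PySem.Str.lower t) with hds
      have hlds : ds.length ≤ n := by
        rw [hds]
        exact le_trans (List.length_dropWhile_le _ ts)
          (by simp only [List.length_cons] at hl; omega)
      have hpds : ds.Pairwise (fun a b => PySem.Str.lower a ≤ PySem.Str.lower b) :=
        (List.pairwise_cons.mp hs).2.sublist (List.dropWhile_sublist _)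
      by_cases hk : PySem.Str.lower x = PySem.Str.lower t
      · have hhead : pvFirstW (PySem.Str.lower x) (t :: ts) = some t := by
          simp [pvFirstW, hk]
        rw [hhead]
        constructor
        · rintro h
          rcases List.mem_cons.mp h with rfl | h'
          · rfl
          · exfalso
            have := pv_drop_gt t ts hs x (pv_mem_pvDedup h')
            rw [hk] at this; exact lt_irrefl _ this
        · rintro h; rw [Option.some_inj] at h; exact h ▸ List.mem_cons_self
      · have hfilter : pvFirstW (PySem.Str.lower x) (t :: ts) = pvFirstW (PySem.Str.lower x) ds := by
          have h1 : (t :: ts).filter (fun u => PySem.Str.lower u = PySem.Str.lower x)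
              = ts.filter (fun u => PySem.Str.lower u = PySem.Str.lower x) := by
            rw [List.filter_cons, if_neg (by simpa using fun he : PySem.Str.lower t = PySem.Str.lower x => hk he.symm)]
          have h2 : ts.filter (fun u => PySem.Str.lower u = PySem.Str.lower x)
              = ds.filter (fun u => PySem.Str.lower u = PySem.Str.lower x) := by
            conv_lhs => rw [← List.takeWhile_append_dropWhile
              (p := fun u => decide (PySem.Str.lower u = PySem.Str.lower t)) (l := ts)]
            rw [List.filter_append]
            have : (ts.takeWhile (fun u => decide (PySem.Str.lower u = PySem.Str.lower t))).filter
                (fun u => PySem.Str.lower u = PySem.Str.lower x) = [] := by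
              rw [List.filter_eq_nil_iff]
              intro u hu
              have := List.mem_takeWhile_imp hu
              simp only [decide_eq_true_eq] at this ⊢
              intro he; exact hk (he ▸ this ▸ rfl)
            rw [this, List.nil_append]
          rw [pvFirstW, pvFirstW, h1, h2]
        rw [hfilter]
        constructor
        · intro h
          rcases List.mem_cons.mp h with rfl | h'
          · exact absurd rfl hk
          · exact (ih ds hlds hpds x).mp h'
        · intro h
          exact List.mem_cons_of_mem _ ((ih ds hlds hpds x).mpr h)

lemma pv_eq_of_sorted_lt_of_mem_iff {α κ : Type} [LinearOrder κ] (key : α → κ) :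
    ∀ (l₁ l₂ : List α), l₁.Pairwise (fun a b => key a < key b) →
      l₂.Pairwise (fun a b => key a < key b) → (∀ x, x ∈ l₁ ↔ x ∈ l₂) → l₁ = l₂ := by
  intro l₁
  induction l₁ with
  | nil =>
    intro l₂ _ _ hm
    cases l₂ with
    | nil => rfl
    | cons b t₂ => exact absurd ((hm b).mpr List.mem_cons_self) (List.not_mem_nil)
  | cons a t₁ ih =>
    intro l₂ h₁ h₂ hm
    cases l₂ with
    | nil => exact absurd ((hm a).mp List.mem_cons_self) (List.not_mem_nil)
    | cons b t₂ =>
      rw [List.pairwise_cons] at h₁ h₂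
      have hab : a = b := by
        rcases List.mem_cons.mp ((hm a).mp List.mem_cons_self) with h | ha
        · exact h
        · rcases List.mem_cons.mp ((hm b).mpr List.mem_cons_self) with h | hb
          · exact h.symm
          · exact absurd (lt_trans (h₂.1 a ha) (h₁.1 b hb)) (lt_irrefl _)
      subst hab
      have hmt : ∀ x, x ∈ t₁ ↔ x ∈ t₂ := by
        intro x
        constructor
        · intro hx
          rcases List.mem_cons.mp ((hm x).mp (List.mem_cons_of_mem _ hx)) with rfl | h
          · exact absurd (h₁.1 x hx) (lt_irrefl _)
          · exact h
        · intro hx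
          rcases List.mem_cons.mp ((hm x).mpr (List.mem_cons_of_mem _ hx)) with rfl | h
          · exact absurd (h₂.1 x hx) (lt_irrefl _)
          · exact h
      rw [ih t₂ h₁.2 h₂.2 hmt]

-- value stored by A's dict at key k is the first cleaned phrase with that casefold
lemma pv_value_spec {k : String} {M : List String}
    (d : PySem.Dict String String) (hd : d = M.foldl (fun canon t => canon.setdefault (PySem.Str.lower t) t) PySem.Dict.empty)
    (hk : k ∈ M.map (fun t => PySem.Str.lower t)) :
    d.get? k = some ((d.get? k).getD "") ∧ PySem.Str.lower ((d.get? k).getD "") = k := by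
  obtain ⟨t, ht⟩ := (pv_firstW_ne_none_iff k M).mpr hk
  have hget : d.get? k = some t := by
    rw [hd, pv_get_foldC, PySem.Dict.get?_empty, Option.none_or, ht]
  rw [hget]
  exact ⟨rfl, pv_firstW_lower ht⟩

-- ===== VERDICT helper: the assembled equivalence =====
theorem pv_main (items : List String) :
    stable_sorted_phrases_py items = stable_sorted_phrases_py_alt items := by
  simp only [stable_sorted_phrases_py, stable_sorted_phrases_py_alt]
  rw [pv_foldA_eq, pv_cleanFold_eq, List.nil_append, pv_foldB_eq, List.nil_append]
  set M := items.filterMap pvClean with hM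
  set canon := M.foldl (fun canon t => canon.setdefault (PySem.Str.lower t) t) PySem.Dict.empty with hcanon
  set S := PySem.List.sorted M (fun t => PySem.Str.lower t) false with hS
  set keysN := PySem.List.sorted canon.keys (fun k => k) false with hkeysN
  have hkmem : ∀ k, k ∈ canon.keys ↔ k ∈ M.map (fun t => PySem.Str.lower t) := by
    intro k
    rw [hcanon, pv_mem_keys_foldC]
    simp [PySem.Dict.keys_empty]
  have hSp : S.Pairwise (fun a b => PySem.Str.lower a ≤ PySem.Str.lower b) :=
    PySem.List.sorted_pairwise M (fun t => PySem.Str.lower t)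
  have hfirstS : ∀ k, pvFirstW k S = pvFirstW k M := by
    intro k
    rw [pvFirstW, pvFirstW, hS, pv_filter_sorted]
  apply pv_eq_of_sorted_lt_of_mem_iff (fun t => PySem.Str.lower t)
  · -- A's output has strictly increasing casefold keys
    rw [List.pairwise_map]
    have hnd : keysN.Nodup := by
      have h1 : canon.keys.Nodup := pv_keys_foldC_nodup M _ PySem.Dict.nodup_keys_empty
      exact ((PySem.List.sorted_perm canon.keys (fun k => k) false).symm).nodup h1
    have hle : keysN.Pairwise (fun a b => a ≤ b) :=
      PySem.List.sorted_pairwise canon.keys (fun k => k)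
    have hlt : keysN.Pairwise (fun a b => a < b) :=
      (hle.and hnd).imp (fun h => lt_of_le_of_ne h.1 h.2)
    refine hlt.imp_of_mem ?_
    intro a b ha hb hab
    have hva := (pv_value_spec canon hcanon ((hkmem a).mp ((PySem.List.mem_sorted _ _ _ a).mp ha))).2
    have hvb := (pv_value_spec canon hcanon ((hkmem b).mp ((PySem.List.mem_sorted _ _ _ b).mp hb))).2
    rw [hva, hvb]
    exact hab
  · -- B's output has strictly increasing casefold keys
    exact pv_dedup_pairwise S.length S le_rfl hSp
  · -- same members: both keep exactly the first cleaned phrase of each casefold class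
    intro x
    rw [pv_mem_dedup_iff S.length S le_rfl hSp x, hfirstS]
    constructor
    · intro hx
      obtain ⟨k, hkN, hkx⟩ := List.mem_map.mp hx
      have hkM : k ∈ M.map (fun t => PySem.Str.lower t) :=
        (hkmem k).mp ((PySem.List.mem_sorted _ _ _ k).mp hkN)
      obtain ⟨hsome, hlow⟩ := pv_value_spec canon hcanon hkM
      have hget : canon.get? k = pvFirstW k M := by
        rw [hcanon, pv_get_foldC, PySem.Dict.get?_empty, Option.none_or]
      have hlowx : PySem.Str.lower x = k := by rw [← hkx]; exact hlow
      rw [hlowx, ← hget, hsome, hkx]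
    · intro hx
      have hkM : PySem.Str.lower x ∈ M.map (fun t => PySem.Str.lower t) :=
        (pv_firstW_ne_none_iff _ M).mp ⟨x, hx⟩
      have hget : canon.get? (PySem.Str.lower x) = pvFirstW (PySem.Str.lower x) M := by
        rw [hcanon, pv_get_foldC, PySem.Dict.get?_empty, Option.none_or]
      refine List.mem_map.mpr ⟨PySem.Str.lower x, ?_, ?_⟩
      · exact (PySem.List.mem_sorted _ _ _ _).mpr ((hkmem _).mpr hkM)
      · rw [hget, hx]; rfl

-- ===== VERDICT (by name: the statement is the Claim_ definition above) =====
theorem stable_sorted_phrases_py_spec : Claim_equal_stable_sorted_phrases_py := by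
  intro items _
  unfold Spec_stable_sorted_phrases_py
  exact pv_main items
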